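-- pv_equiv track=rewrite | github.com/Pranshi116/python_DQE | Functions_hometask_3.py | collect_key_stats
-- ===== SOURCE A (Python) =====
-- from typing import List, Dict, Tuple
--
-- def collect_key_stats(dict_list: List[Dict[str, int]]) -> Tuple[Dict[str, int], Dict[str, int], Dict[str, int]]:
--     """
--     Collect statistics about keys:
--     - result: max value for each key
--     - key_origin: which dictionary had that max
--     - key_counts: how many times each key appeared
--     """
--     result = {}
--     key_origin = {}
--     key_counts = {}
--
--     for idx, d in enumerate(dict_list, start=1):
--         for key, value in d.items():
--             key_counts[key] = key_counts.get(key, 0) + 1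
--             if key not in result or value > result[key]:
--                 result[key] = value
--                 key_origin[key] = idx
--
--     return result, key_origin, key_counts
-- ===== SOURCE B (Python) =====
-- from typing import List, Dict, Tuple
--
-- def collect_key_stats(dict_list: List[Dict[str, int]]) -> Tuple[Dict[str, int], Dict[str, int], Dict[str, int]]:
--     # Two-phase decomposition: first group every occurrence as (origin, value) pairs
--     # per key, then derive all three statistics per key from its pair list.
--     grouping = {}
--     for idx, d in enumerate(dict_list, start=1):
--         for key, value in d.items():
--             grouping.setdefault(key, []).append((idx, value))
--
--     result = {}
--     key_origin = {}
--     key_counts = {}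
--     for key, pairs in grouping.items():
--         key_counts[key] = len(pairs)
--         best = max(pairs, key=lambda p: p[1])  # first maximal pair -> earliest origin wins ties
--         result[key] = best[1]
--         key_origin[key] = best[0]
--     return result, key_origin, key_counts
-- ===== Notes on version B (the rewrite author's own statement) =====
-- stated objective: alternative
-- what changed: Replaces A's single pass that incrementally maintains three dicts with a two-phase decomposition: first group all occurrences per key as (origin, value) pairs, then compute count, first-max value and its origin per key from each group.
import Mathlib
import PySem

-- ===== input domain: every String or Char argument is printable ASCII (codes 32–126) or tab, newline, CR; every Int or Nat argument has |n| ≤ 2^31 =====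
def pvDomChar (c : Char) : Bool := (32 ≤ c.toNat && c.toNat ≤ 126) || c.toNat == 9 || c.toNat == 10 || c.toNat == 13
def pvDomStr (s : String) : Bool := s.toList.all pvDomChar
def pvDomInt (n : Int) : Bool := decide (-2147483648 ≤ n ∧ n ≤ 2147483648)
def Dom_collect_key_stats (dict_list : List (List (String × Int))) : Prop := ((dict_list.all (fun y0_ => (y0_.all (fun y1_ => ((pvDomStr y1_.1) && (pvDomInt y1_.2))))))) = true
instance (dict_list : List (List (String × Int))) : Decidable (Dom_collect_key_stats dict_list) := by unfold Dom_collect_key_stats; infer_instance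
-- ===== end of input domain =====

-- B replaces A's incremental three-dict pass by a two-phase decomposition (group occurrences per key,
-- then derive max value / origin / count per group); alternative structure, same cost.


-- ===== PORT A =====
-- inner loop body of A: update key_counts, then result/key_origin on 'key not in result or value > result[key]'
def aStep (idx : Int)
    (st : PySem.Dict String Int × PySem.Dict String Int × PySem.Dict String Int)
    (kv : String × Int) :
    PySem.Dict String Int × PySem.Dict String Int × PySem.Dict String Int :=
  let c := st.2.2.insert kv.1 (st.2.2.getD kv.1 0 + 1)
  match st.1.get? kv.1 with
  | none => (st.1.insert kv.1 kv.2, st.2.1.insert kv.1 idx, c)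
  | some w => if kv.2 > w then (st.1.insert kv.1 kv.2, st.2.1.insert kv.1 idx, c)
              else (st.1, st.2.1, c)

def collect_key_stats (dict_list : List (List (String × Int))) : (List (String × Int)) × (List (String × Int)) × (List (String × Int)) :=
  let fin := dict_list.foldl
    (fun acc d => (acc.1 + 1, d.foldl (aStep acc.1) acc.2))
    ((1 : Int), (PySem.Dict.empty, PySem.Dict.empty, PySem.Dict.empty))
  ((fin.2.1).items, (fin.2.2.1).items, (fin.2.2.2).items)

-- ===== PORT B =====
-- first pass: grouping.setdefault(key, []).append((idx, value))
def bGroupStep (idx : Int) (g : PySem.Dict String (List (Int × Int))) (kv : String × Int) :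
    PySem.Dict String (List (Int × Int)) :=
  g.modify kv.1 [] (· ++ [(idx, kv.2)])

-- second pass body: counts, first-max pair (max with key=value), result/origin from it
def bStep (st : PySem.Dict String Int × PySem.Dict String Int × PySem.Dict String Int)
    (kp : String × List (Int × Int)) :
    PySem.Dict String Int × PySem.Dict String Int × PySem.Dict String Int :=
  let c := st.2.2.insert kp.1 (kp.2.length : Int)
  let best := PySem.List.maxD kp.2 (fun p => p.2) (0, 0)
  (st.1.insert kp.1 best.2, st.2.1.insert kp.1 best.1, c)

def collect_key_stats_alt (dict_list : List (List (String × Int))) : (List (String × Int)) × (List (String × Int)) × (List (String × Int)) :=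
  let g := (dict_list.foldl
    (fun acc d => (acc.1 + 1, d.foldl (bGroupStep acc.1) acc.2))
    ((1 : Int), PySem.Dict.empty)).2
  let fin := g.items.foldl bStep (PySem.Dict.empty, PySem.Dict.empty, PySem.Dict.empty)
  (fin.1.items, (fin.2.1).items, (fin.2.2).items)

-- ===== PRECONDITION & SPEC =====
def Spec_collect_key_stats (dict_list : List (List (String × Int))) (out : (List (String × Int)) × (List (String × Int)) × (List (String × Int))) : Prop := out = collect_key_stats_alt dict_list
instance (dict_list : List (List (String × Int))) (out : (List (String × Int)) × (List (String × Int)) × (List (String × Int))) : Decidable (Spec_collect_key_stats dict_list out) := by unfold Spec_collect_key_stats; infer_instance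

-- ===== CLAIM (what is proved, stated in full; the proofs are below) =====
def Claim_equal_collect_key_stats : Prop := ∀ (dict_list : List (List (String × Int))), Dom_collect_key_stats dict_list → Spec_collect_key_stats dict_list (collect_key_stats dict_list)

-- ===== LEMMAS AND PROOFS =====

-- the stream of (origin index, key, value) triples both outer loops traverse
def flatFrom : Int → List (List (String × Int)) → List (Int × String × Int)
  | _, [] => []
  | i, d :: ds => d.map (fun kv => (i, kv.1, kv.2)) ++ flatFrom (i + 1) ds

def bestOf (ps : List (Int × Int)) : Int × Int := PySem.List.maxD ps (fun p => p.2) (0, 0)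

lemma A_flat : ∀ (ds : List (List (String × Int))) (i : Int) st,
    (ds.foldl (fun acc d => (acc.1 + 1, d.foldl (aStep acc.1) acc.2)) (i, st)).2 =
      (flatFrom i ds).foldl (fun st t => aStep t.1 st t.2) st := by
  intro ds
  induction ds with
  | nil => intro i st; rfl
  | cons d ds ih =>
      intro i st
      simp only [List.foldl_cons, flatFrom, List.foldl_append, List.foldl_map]
      exact ih (i + 1) _

lemma B_flat : ∀ (ds : List (List (String × Int))) (i : Int) g,
    (ds.foldl (fun acc d => (acc.1 + 1, d.foldl (bGroupStep acc.1) acc.2)) (i, g)).2 =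
      (flatFrom i ds).foldl (fun g t => bGroupStep t.1 g t.2) g := by
  intro ds
  induction ds with
  | nil => intro i g; rfl
  | cons d ds ih =>
      intro i g
      simp only [List.foldl_cons, flatFrom, List.foldl_append, List.foldl_map]
      exact ih (i + 1) _

lemma max?_append_some (ps : List (Int × Int)) (q m : Int × Int)
    (h : PySem.List.max? ps (fun p => p.2) = some m) :
    PySem.List.max? (ps ++ [q]) (fun p => p.2) = if m.2 < q.2 then some q else some m := by
  simp only [PySem.List.max?, List.foldl_append, List.foldl_cons, List.foldl_nil]
  simp only [PySem.List.max?] at h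
  rw [h]

lemma foldl_isSome {α β : Type} (f : Option α → β → Option α)
    (hf : ∀ m x, (f (some m) x).isSome) :
    ∀ (l : List β) (m : α), (l.foldl f (some m)).isSome := by
  intro l
  induction l with
  | nil => intro m; rfl
  | cons x l ih =>
      intro m
      simp only [List.foldl_cons]
      obtain ⟨m', hm'⟩ := Option.isSome_iff_exists.mp (hf m x)
      rw [hm']
      exact ih m'

lemma max?_isSome (ps : List (Int × Int)) (h : ps ≠ []) :
    (PySem.List.max? ps (fun p => p.2)).isSome := by
  match ps with
  | p :: ps' =>
      simp only [PySem.List.max?, List.foldl_cons]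
      exact foldl_isSome _ (fun m x => by split <;> first | rfl | (split <;> rfl)) ps' p

lemma bestOf_append (ps : List (Int × Int)) (q : Int × Int) (h : ps ≠ []) :
    bestOf (ps ++ [q]) = if (bestOf ps).2 < q.2 then q else bestOf ps := by
  obtain ⟨m, hm⟩ := Option.isSome_iff_exists.mp (max?_isSome ps h)
  simp only [bestOf, PySem.List.maxD]
  rw [max?_append_some ps q m hm, hm]
  simp only [Option.getD_some]
  split_ifs <;> rfl

-- proof-side names for the two flat folds
def gOf (ts : List (Int × String × Int)) : PySem.Dict String (List (Int × Int)) :=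
  ts.foldl (fun g t => bGroupStep t.1 g t.2) PySem.Dict.empty

def aOf (ts : List (Int × String × Int)) :
    PySem.Dict String Int × PySem.Dict String Int × PySem.Dict String Int :=
  ts.foldl (fun st t => aStep t.1 st t.2) (PySem.Dict.empty, PySem.Dict.empty, PySem.Dict.empty)

lemma gOf_append (ts : List (Int × String × Int)) (t : Int × String × Int) :
    gOf (ts ++ [t]) = (gOf ts).insert t.2.1 ((gOf ts).getD t.2.1 [] ++ [(t.1, t.2.2)]) := by
  simp [gOf, List.foldl_append, bGroupStep, PySem.Dict.modify]

lemma aOf_append (ts : List (Int × String × Int)) (t : Int × String × Int) :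
    aOf (ts ++ [t]) = aStep t.1 (aOf ts) t.2 := by
  simp [aOf, List.foldl_append]

lemma gOf_nodup (ts : List (Int × String × Int)) : (gOf ts).keys.Nodup := by
  have h := PySem.Dict.nodup_keys_foldl_modify_key ts (fun t => t.2.1) ([] : List (Int × Int))
    (fun _ t => (· ++ [(t.1, t.2.2)])) PySem.Dict.empty PySem.Dict.nodup_keys_empty
  simpa [gOf, bGroupStep] using h

lemma keys_of_map_fst {ν' : Type} (d : PySem.Dict String Int) (g : PySem.Dict String ν')
    (val : String × ν' → Int)
    (h : d.items = g.items.map (fun kp => (kp.1, val kp))) : d.keys = g.keys := by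
  simp only [PySem.Dict.keys, h, List.map_map]
  rfl

-- the central invariant: A's running state is the pointwise image of B's grouping dict
lemma central (ts : List (Int × String × Int)) :
    (∀ p ∈ (gOf ts).items, p.2 ≠ []) ∧
    (aOf ts).1.items = (gOf ts).items.map (fun kp => (kp.1, (bestOf kp.2).2)) ∧
    (aOf ts).2.1.items = (gOf ts).items.map (fun kp => (kp.1, (bestOf kp.2).1)) ∧
    (aOf ts).2.2.items = (gOf ts).items.map (fun kp => (kp.1, (kp.2.length : Int))) := by
  induction ts using List.reverseRecOn with
  | nil =>
      refine ⟨?_, rfl, rfl, rfl⟩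
      intro p hp
      rw [show (gOf ([] : List (Int × String × Int))).items = [] from rfl] at hp
      cases hp
  | append_singleton ts t ih =>
      obtain ⟨i, k, v⟩ := t
      obtain ⟨hne, h1, h2, h3⟩ := ih
      have hnd := gOf_nodup ts
      have hk1 : (aOf ts).1.keys = (gOf ts).keys := keys_of_map_fst _ _ _ h1
      have hk2 : (aOf ts).2.1.keys = (gOf ts).keys := keys_of_map_fst _ _ _ h2
      have hk3 : (aOf ts).2.2.keys = (gOf ts).keys := keys_of_map_fst _ _ _ h3
      rw [gOf_append, aOf_append]
      by_cases hc : (gOf ts).contains k = true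
      · -- key already grouped: g has a nonempty pair list ps at k
        obtain ⟨ps, hps⟩ := Option.isSome_iff_exists.mp
          (show ((gOf ts).get? k).isSome by
            rw [← PySem.Dict.contains_eq_isSome_get?]; exact hc)
        have hmem : (k, ps) ∈ (gOf ts).items := PySem.Dict.mem_items_of_get?_eq_some _ hps
        have hpsne : ps ≠ [] := hne _ hmem
        have hgetD : (gOf ts).getD k [] = ps := PySem.Dict.getD_of_get?_eq_some _ _ hps
        have hkey : ∀ p ∈ (gOf ts).items, (p.1 == k) = true → p = (k, ps) := by
          intro p hp hpk
          have hpk' : p.1 = k := by simpa using hpk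
          have := PySem.Dict.get?_of_mem_items _ (show (p.1, p.2) ∈ (gOf ts).items from hp) hnd
          rw [hpk', hps] at this
          exact Prod.ext hpk' (by simpa using this.symm)
        have hgitems : ((gOf ts).insert k ((gOf ts).getD k [] ++ [(i, v)])).items =
            (gOf ts).items.map (fun p => if (p.1 == k) = true then (k, ps ++ [(i, v)]) else p) := by
          rw [hgetD]; exact PySem.Dict.items_insert_of_contains _ _ hc
        have hget1 : (aOf ts).1.get? k = some (bestOf ps).2 := by
          refine PySem.Dict.get?_of_mem_items _ ?_ (hk1 ▸ hnd)
          rw [h1]; exact List.mem_map_of_mem hmem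
        have hc1 : (aOf ts).1.contains k = true := by
          rw [PySem.Dict.contains_eq_isSome_get?, hget1]; rfl
        have hc2 : (aOf ts).2.1.contains k = true := by
          rw [PySem.Dict.contains_iff_mem_keys, hk2, ← PySem.Dict.contains_iff_mem_keys]; exact hc
        have hc3 : (aOf ts).2.2.contains k = true := by
          rw [PySem.Dict.contains_iff_mem_keys, hk3, ← PySem.Dict.contains_iff_mem_keys]; exact hc
        have hcount : (aOf ts).2.2.getD k 0 = (ps.length : Int) := by
          refine PySem.Dict.getD_of_mem_items _ ?_ (hk3 ▸ hnd) 0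
          rw [h3]; exact List.mem_map_of_mem hmem
        have hne' : ∀ p ∈ ((gOf ts).insert k ((gOf ts).getD k [] ++ [(i, v)])).items, p.2 ≠ [] := by
          rw [hgitems]
          intro p hp
          obtain ⟨q, hq, rfl⟩ := List.mem_map.mp hp
          by_cases hqk : (q.1 == k) = true <;> simp [hqk]
          exact hne _ hq
        have hcnt : ((aOf ts).2.2.insert k ((aOf ts).2.2.getD k 0 + 1)).items =
            ((gOf ts).insert k ((gOf ts).getD k [] ++ [(i, v)])).items.map
              (fun kp => (kp.1, (kp.2.length : Int))) := by
          rw [hgitems, PySem.Dict.items_insert_of_contains _ _ hc3, h3, hcount,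
            List.map_map, List.map_map]
          refine List.map_congr_left ?_
          intro p hp
          by_cases hpk : p.1 = k
          · have := hkey p hp (by simp [hpk])
            subst this
            simp
          · simp [hpk]
        by_cases hv : (bestOf ps).2 < v
        · -- new value strictly larger: A updates result and origin
          have hbest : bestOf (ps ++ [(i, v)]) = (i, v) := by
            rw [bestOf_append ps (i, v) hpsne]; simp [hv]
          simp only [aStep, hget1]
          rw [if_pos hv]
          refine ⟨hne', ?_, ?_, hcnt⟩
          · rw [hgitems, PySem.Dict.items_insert_of_contains _ _ hc1, h1,
              List.map_map, List.map_map]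
            refine List.map_congr_left ?_
            intro p hp
            by_cases hpk : p.1 = k <;> simp [hpk, hbest]
          · rw [hgitems, PySem.Dict.items_insert_of_contains _ _ hc2, h2,
              List.map_map, List.map_map]
            refine List.map_congr_left ?_
            intro p hp
            by_cases hpk : p.1 = k <;> simp [hpk, hbest]
        · -- not larger: A keeps result and origin
          have hbest : bestOf (ps ++ [(i, v)]) = bestOf ps := by
            rw [bestOf_append ps (i, v) hpsne]; simp [hv]
          simp only [aStep, hget1]
          rw [if_neg hv]
          refine ⟨hne', ?_, ?_, hcnt⟩
          · rw [hgitems, h1, List.map_map]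
            refine List.map_congr_left ?_
            intro p hp
            by_cases hpk : p.1 = k
            · have := hkey p hp (by simp [hpk])
              subst this
              simp [hbest]
            · simp [hpk]
          · rw [hgitems, h2, List.map_map]
            refine List.map_congr_left ?_
            intro p hp
            by_cases hpk : p.1 = k
            · have := hkey p hp (by simp [hpk])
              subst this
              simp [hbest]
            · simp [hpk]
      · -- fresh key
        have hc' : (gOf ts).contains k = false := by
          cases h : (gOf ts).contains k
          · rfl
          · exact absurd h hc
        have hkeysk : k ∉ (gOf ts).keys := fun hm =>
          hc ((PySem.Dict.contains_iff_mem_keys _ _).mpr hm)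
        have hgetD : (gOf ts).getD k [] = [] := PySem.Dict.getD_of_not_contains _ _ hc'
        have hgitems : ((gOf ts).insert k ((gOf ts).getD k [] ++ [(i, v)])).items =
            (gOf ts).items ++ [(k, [(i, v)])] := by
          rw [hgetD]
          simpa using PySem.Dict.items_insert_of_not_contains _ _ hc'
        have hget1 : (aOf ts).1.get? k = none :=
          (PySem.Dict.get?_eq_none_iff_not_mem_keys _ _).mpr (hk1 ▸ hkeysk)
        have hc1 : (aOf ts).1.contains k = false := by
          rw [PySem.Dict.contains_eq_isSome_get?, hget1]; rfl
        have hc2 : (aOf ts).2.1.contains k = false := by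
          cases h : (aOf ts).2.1.contains k
          · rfl
          · exact absurd (hk2 ▸ (PySem.Dict.contains_iff_mem_keys _ _).mp h) hkeysk
        have hc3 : (aOf ts).2.2.contains k = false := by
          cases h : (aOf ts).2.2.contains k
          · rfl
          · exact absurd (hk3 ▸ (PySem.Dict.contains_iff_mem_keys _ _).mp h) hkeysk
        have hcount : (aOf ts).2.2.getD k 0 = 0 := PySem.Dict.getD_of_not_contains _ _ hc3
        simp only [aStep, hget1]
        refine ⟨?_, ?_, ?_, ?_⟩
        · rw [hgitems]
          intro p hp
          rcases List.mem_append.mp hp with h | h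
          · exact hne _ h
          · simp at h; subst h; simp
        · rw [hgitems, PySem.Dict.items_insert_of_not_contains _ _ hc1, h1, List.map_append]
          rfl
        · rw [hgitems, PySem.Dict.items_insert_of_not_contains _ _ hc2, h2, List.map_append]
          rfl
        · rw [hgitems, PySem.Dict.items_insert_of_not_contains _ _ hc3, h3, hcount,
            List.map_append]
          rfl

lemma triple_split (l : List (String × List (Int × Int))) :
    ∀ r o c, l.foldl bStep (r, o, c) =
      (l.foldl (fun r kp => r.insert kp.1 (bestOf kp.2).2) r,
       l.foldl (fun o kp => o.insert kp.1 (bestOf kp.2).1) o,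
       l.foldl (fun c kp => c.insert kp.1 (kp.2.length : Int)) c) := by
  induction l with
  | nil => intro r o c; rfl
  | cons kp l ih => intro r o c; simp only [List.foldl_cons]; exact ih _ _ _

lemma second_pass (ts : List (Int × String × Int)) :
    ((aOf ts).1.items, (aOf ts).2.1.items, (aOf ts).2.2.items) =
      (((gOf ts).items.foldl bStep (PySem.Dict.empty, PySem.Dict.empty, PySem.Dict.empty)).1.items,
       ((gOf ts).items.foldl bStep (PySem.Dict.empty, PySem.Dict.empty, PySem.Dict.empty)).2.1.items,
       ((gOf ts).items.foldl bStep (PySem.Dict.empty, PySem.Dict.empty, PySem.Dict.empty)).2.2.items) := by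
  obtain ⟨_, h1, h2, h3⟩ := central ts
  have hnodup : ((gOf ts).items.map (fun kp => kp.1)).Nodup := by
    have := gOf_nodup ts
    simpa [PySem.Dict.keys] using this
  rw [triple_split]
  dsimp only
  rw [PySem.Dict.items_foldl_insert_fresh (gOf ts).items (fun kp => kp.1)
      (fun kp => (bestOf kp.2).2) PySem.Dict.empty (fun a _ => PySem.Dict.contains_empty _) hnodup,
    PySem.Dict.items_foldl_insert_fresh (gOf ts).items (fun kp => kp.1)
      (fun kp => (bestOf kp.2).1) PySem.Dict.empty (fun a _ => PySem.Dict.contains_empty _) hnodup,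
    PySem.Dict.items_foldl_insert_fresh (gOf ts).items (fun kp => kp.1)
      (fun kp => (kp.2.length : Int)) PySem.Dict.empty (fun a _ => PySem.Dict.contains_empty _) hnodup,
    h1, h2, h3]
  rfl

-- ===== VERDICT (by name: the statement is the Claim_ definition above) =====
theorem collect_key_stats_spec : Claim_equal_collect_key_stats := by
  unfold Claim_equal_collect_key_stats
  intro dl _
  unfold Spec_collect_key_stats
  simp only [collect_key_stats, collect_key_stats_alt]
  rw [A_flat, B_flat]
  exact second_pass (flatFrom 1 dl)
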